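-- pv_equiv track=rewrite | github.com/CrisBelDev/ejercicios-Juez-Pato | 1000-1999/1394_Competidores_OBI.py | veri
-- ===== SOURCE A (Python) =====
-- PR = ['2', '3', '5', '7']
--
-- def veri(num):
--     c = 0
--     sum = 0
--     for i in range(4):
--         for j in range(len(num)):
--             if PR[i] == num[j]:
--                 c += 1
--                 con = int(num[j])
--                 sum += con
--     if sum % 2 == 0 and c >= 3:
--         return True
--     return False
-- ===== SOURCE B (Python) =====
-- def veri(num):
--     # Sum of the prime digits is even iff the number of odd prime digits
--     # (3, 5, 7) is even, since each '2' contributes an even amount.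
--     odd = num.count('3') + num.count('5') + num.count('7')
--     return odd % 2 == 0 and odd + num.count('2') >= 3
-- ===== Notes on version B (the rewrite author's own statement) =====
-- stated objective: simpler
-- what changed: Dropped the count-and-sum accumulation entirely: B counts occurrences of each prime digit with str.count and uses the parity identity that the sum of prime digits is even iff the number of odd prime digits (3,5,7) is even, so no running sum, per-character branch or int() conversion exists.
import Mathlib
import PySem

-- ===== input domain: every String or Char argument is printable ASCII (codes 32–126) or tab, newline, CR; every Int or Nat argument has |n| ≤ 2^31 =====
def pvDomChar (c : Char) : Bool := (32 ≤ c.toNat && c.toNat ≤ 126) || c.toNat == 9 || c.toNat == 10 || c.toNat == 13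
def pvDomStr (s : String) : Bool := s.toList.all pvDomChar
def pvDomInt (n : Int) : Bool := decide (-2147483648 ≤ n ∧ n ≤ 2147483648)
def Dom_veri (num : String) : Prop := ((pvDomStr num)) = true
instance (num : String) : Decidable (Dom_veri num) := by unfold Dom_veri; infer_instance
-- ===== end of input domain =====

-- B drops A's count-and-sum accumulation: it counts each prime digit with str.count and
-- decides parity by the number of odd prime digits; objective: simpler.

-- int(ch) for a single character ch (Python's int() on a one-character string)
def pvDv (ch : Char) : Int := (PySem.Int.ofStr? (String.ofList [ch])).getD 0

-- ===== PORT A =====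
def PR : List Char := ['2', '3', '5', '7']

-- inner loop of A: "for j in range(len(num)): if PR[i] == num[j]: c += 1; sum += int(num[j])"
def pvInnerA (p : Char) (acc : Int × Int) (l : List Char) : Int × Int :=
  l.foldl (fun a ch => if p == ch then (a.1 + 1, a.2 + pvDv ch) else a) acc

def veri (num : String) : Bool :=
  let r := PR.foldl (fun acc p => pvInnerA p acc num.toList) (0, 0)
  if PySem.Int.mod r.2 2 == 0 && decide (r.1 ≥ 3) then true else false

-- ===== PORT B =====
def veri_alt (num : String) : Bool :=
  let odd : Int := (PySem.Str.count num "3" : Int) + (PySem.Str.count num "5" : Int)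
                   + (PySem.Str.count num "7" : Int)
  decide (PySem.Int.mod odd 2 = 0) && decide (odd + (PySem.Str.count num "2" : Int) ≥ 3)

-- ===== PRECONDITION & SPEC =====
def Spec_veri (num : String) (out : Bool) : Prop := out = veri_alt num
instance (num : String) (out : Bool) : Decidable (Spec_veri num out) := by unfold Spec_veri; infer_instance

-- ===== CLAIM (what is proved, stated in full; the proofs are below) =====
def Claim_equal_veri : Prop := ∀ (num : String), Dom_veri num → Spec_veri num (veri num)

-- ===== LEMMAS AND PROOFS =====

theorem pv_fmod_two (a : Int) : a.fmod 2 = a % 2 := by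
  rw [Int.fmod_eq_emod]; norm_num

-- Python's s.count(sub) for a single-character sub is the plain character count
theorem pv_count_go_singleton (c : Char) (l : List Char) (fuel acc : Nat)
    (h : l.length ≤ fuel) :
    PySem.Chars.count.go [c] fuel l acc = acc + l.count c := by
  induction l generalizing fuel acc with
  | nil => cases fuel <;> simp [PySem.Chars.count.go]
  | cons hd t ih =>
    cases fuel with
    | zero => simp at h
    | succ n =>
      simp only [List.length_cons, Nat.succ_le_succ_iff] at h
      by_cases he : hd = c
      · subst he
        simp [PySem.Chars.count.go, List.isPrefixOf, ih _ _ h]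
        omega
      · have : ([c].isPrefixOf (hd :: t)) = false := by
          simp [List.isPrefixOf]; exact fun e => (he e.symm).elim
        simp [PySem.Chars.count.go, this, ih _ _ h, he]

theorem pv_str_count_singleton (s : String) (c : Char) :
    PySem.Str.count s (String.ofList [c]) = s.toList.count c := by
  have h := pv_count_go_singleton c s.toList s.toList.length 0 le_rfl
  simp only [PySem.Str.count, PySem.Chars.count, String.toList_ofList] at *
  simpa using h

-- A's inner loop from (0,0) is (count, count * digit value)
theorem pvInnerA_eq_count (p : Char) (l : List Char) (acc : Int × Int) :
    pvInnerA p acc l = (acc.1 + (l.count p : Int), acc.2 + (l.count p : Int) * pvDv p) := by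
  induction l generalizing acc with
  | nil => simp [pvInnerA]
  | cons hd t ih =>
    simp only [pvInnerA, List.foldl_cons] at *
    by_cases h : p = hd
    · subst h
      simp only [BEq.rfl, if_true]
      rw [ih (acc.1 + 1, acc.2 + pvDv p)]
      simp [List.count_cons_self]
      constructor <;> ring
    · have hb : (p == hd) = false := by simp [h]
      rw [hb]
      simp only [Bool.false_eq_true, if_false]
      rw [ih acc]
      have h' : ¬ hd = p := fun e => h e.symm
      simp [h']

-- ===== VERDICT (by name: the statement is the Claim_ definition above) =====
theorem veri_spec : Claim_equal_veri := by
  intro num _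
  unfold Spec_veri veri veri_alt
  have h2 : PySem.Str.count num "2" = num.toList.count '2' := pv_str_count_singleton num '2'
  have h3 : PySem.Str.count num "3" = num.toList.count '3' := pv_str_count_singleton num '3'
  have h5 : PySem.Str.count num "5" = num.toList.count '5' := pv_str_count_singleton num '5'
  have h7 : PySem.Str.count num "7" = num.toList.count '7' := pv_str_count_singleton num '7'
  have d2 : pvDv '2' = 2 := by decide
  have d3 : pvDv '3' = 3 := by decide
  have d5 : pvDv '5' = 5 := by decide
  have d7 : pvDv '7' = 7 := by decide
  simp only [PR, List.foldl_cons, List.foldl_nil, pvInnerA_eq_count, h2, h3, h5, h7,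
    d2, d3, d5, d7, PySem.Int.mod, pv_fmod_two]
  set a : Int := (num.toList.count '2' : Int) with ha
  set b : Int := (num.toList.count '3' : Int) with hb
  set c : Int := (num.toList.count '5' : Int) with hc
  set d : Int := (num.toList.count '7' : Int) with hd
  split_ifs with h
  · simp only [Bool.and_eq_true, beq_iff_eq, decide_eq_true_eq] at h
    symm
    simp only [Bool.and_eq_true, decide_eq_true_eq]
    constructor <;> omega
  · rw [Bool.and_eq_true, not_and_or] at h
    symm
    rw [Bool.and_eq_false_iff]
    simp only [beq_iff_eq, decide_eq_true_eq, decide_eq_false_iff_not] at h ⊢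
    rcases h with h | h
    · left; omega
    · right; omega
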